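-- pv_equiv track=rewrite | github.com/latex-access/latex-access | ueb.py | capitalise
-- ===== SOURCE A (Python) =====
-- def capitalise (input):
--     """Put in capital signs in UEB translation.
--
--     Add a dot 6 to indicate a capital letter, and make that letter lower
--     case in the translation so we don't get annoying computer Braille
--     dot 7..."""
--     eol=False # not at end of line yet
--     incaps = False # Are we in capital mode
--     out=""
--     incount=0
--     for x in input: # move through input by char
--         if incaps and not x.isupper ():
--             incaps = False
--         if not x.isalpha (): # Pointless it's not a letter
--             incount +=1
--             out+=x
--             continue
--         if incount+1 >= len (input): # We are on the last char
--             eol=True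
--         if not x.islower() and not incaps: # We have capital letter
--             incaps=True
--             if eol: # finish end of line
--                 out+=","+x.lower()
--                 break
--             if input[incount+1].isalpha() and input[incount+1] != ' ' and not input[incount+1].islower(): # next letter is cap
--                 out+=',,'+x.lower()
--                 incount +=1
--                 continue
--             else: # Only this letter is cap next is not
--                 out+=','+x.lower()
--                 incount +=1
--                 continue
--         if x.islower (): # lower case
--             incount +=1
--             out+=x
--             incaps = False
--             continue
--         # We got nothing
--         out+=x.lower()
--         incount+=1
--     return out
-- ===== SOURCE B (Python) =====
-- def capitalise(input):
--     """Put in capital signs in UEB translation (run-based rewrite)."""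
--     out = []
--     i = 0
--     n = len(input)
--     while i < n:
--         x = input[i]
--         if not x.isalpha() or x.islower():
--             out.append(x)
--             i += 1
--         else:
--             j = i + 1
--             while j < n and input[j].isupper():
--                 j += 1
--             out.append(',,' if j - i >= 2 else ',')
--             out.append(input[i:j].lower())
--             i = j
--     return ''.join(out)
-- ===== Notes on version B (the rewrite author's own statement) =====
-- stated objective: simpler
-- what changed: Replaces A's per-character loop with persistent incaps/eol flags, manual index and one-character lookahead by a single run-based scan that gathers each maximal uppercase run, emits the double or single capital indicator once per run, and joins list pieces.
import Mathlib
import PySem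

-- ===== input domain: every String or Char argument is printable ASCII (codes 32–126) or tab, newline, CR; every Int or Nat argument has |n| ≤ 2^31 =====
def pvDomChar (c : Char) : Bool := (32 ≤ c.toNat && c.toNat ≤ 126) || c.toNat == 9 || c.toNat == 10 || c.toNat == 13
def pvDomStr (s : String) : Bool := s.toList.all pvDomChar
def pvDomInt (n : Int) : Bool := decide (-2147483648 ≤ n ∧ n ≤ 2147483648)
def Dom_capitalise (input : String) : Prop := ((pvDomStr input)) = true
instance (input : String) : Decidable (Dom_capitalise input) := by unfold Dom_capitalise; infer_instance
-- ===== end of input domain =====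

-- B is a run-based rewrite of A (group maximal capital runs, then emit); same return value, no speed claim.

-- ===== PORT A =====
-- literal port of A's char loop with its persistent flags (eol, incaps), the
-- output accumulator and the manual index incount; out is kept as List Char.
def capLoopA (input : List Char) : List Char → Bool → Bool → List Char → Int → List Char
  | [], _, _, out, _ => out
  | x :: rs, eol0, incaps0, out, incount =>
    let incaps := if incaps0 && !PySem.Chars.isupper x then false else incaps0
    if !PySem.Chars.isalpha x then
      capLoopA input rs eol0 incaps (out ++ [x]) (incount + 1)
    else
      let eol := if incount + 1 ≥ (input.length : Int) then true else eol0
      if !PySem.Chars.islower x && !incaps then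
        if eol then out ++ [','] ++ [PySem.Chars.lowerChar x]   -- break: loop ends
        else
          -- input[incount+1]: Python only reaches this when the index is in range
          -- (eol is false), so the .getD default is never consulted
          let nxt := (PySem.List.pyGet? input (incount + 1)).getD ' '
          if PySem.Chars.isalpha nxt && !(nxt == ' ') && !PySem.Chars.islower nxt then
            capLoopA input rs eol true (out ++ [',', ','] ++ [PySem.Chars.lowerChar x]) (incount + 1)
          else
            capLoopA input rs eol true (out ++ [','] ++ [PySem.Chars.lowerChar x]) (incount + 1)
      else if PySem.Chars.islower x then
        capLoopA input rs eol false (out ++ [x]) (incount + 1)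
      else
        capLoopA input rs eol incaps (out ++ [PySem.Chars.lowerChar x]) (incount + 1)

def capitalise (input : String) : String :=
  String.mk (capLoopA input.toList input.toList false false [] 0)

-- ===== PORT B =====
-- literal port of Source B: pass a char through unless it starts a capital run;
-- otherwise take the maximal isupper-run, emit ',,' or ',' plus the lowered run.
def capRunsB : List Char → List Char
  | [] => []
  | x :: rs =>
    if !PySem.Chars.isalpha x || PySem.Chars.islower x then
      x :: capRunsB rs
    else
      let run := rs.takeWhile PySem.Chars.isupper
      (if run.length + 1 ≥ 2 then [',', ','] else [',']) ++
        PySem.Chars.lower (x :: run) ++ capRunsB (rs.dropWhile PySem.Chars.isupper)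
  termination_by l => l.length
  decreasing_by
    · simp
    · simpa using Nat.lt_succ_of_le (List.length_dropWhile_le _ _)

def capitalise_alt (input : String) : String :=
  String.mk (capRunsB input.toList)

-- ===== PRECONDITION & SPEC =====
def Spec_capitalise (input : String) (out : String) : Prop := out = capitalise_alt input
instance (input : String) (out : String) : Decidable (Spec_capitalise input out) := by unfold Spec_capitalise; infer_instance

-- ===== CLAIM (what is proved, stated in full; the proofs are below) =====
def Claim_equal_capitalise : Prop := ∀ (input : String), Dom_capitalise input → Spec_capitalise input (capitalise input)

-- ===== LEMMAS AND PROOFS =====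

-- the B-side meaning of A's incaps flag: inside a run we lower the rest of the
-- run and continue; outside we are just capRunsB
def capB (c : Bool) (l : List Char) : List Char :=
  if c then PySem.Chars.lower (l.takeWhile PySem.Chars.isupper) ++
              capRunsB (l.dropWhile PySem.Chars.isupper)
  else capRunsB l

lemma upper_not_lower {x : Char} (h : PySem.Chars.isupper x = true) :
    PySem.Chars.islower x = false := by
  simp [PySem.Chars.isupper, PySem.Chars.islower, Char.le_def, UInt32.le_iff_toNat_le] at *
  omega

lemma alpha_not_lower_eq_upper {x : Char} :
    (PySem.Chars.isalpha x && !PySem.Chars.islower x) = PySem.Chars.isupper x := by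
  simp only [PySem.Chars.isalpha]
  cases hu : PySem.Chars.isupper x <;> cases hl : PySem.Chars.islower x <;> simp
  · exact absurd hl (by
      simp [PySem.Chars.isupper, PySem.Chars.islower, Char.le_def, UInt32.le_iff_toNat_le] at *
      omega)

lemma upper_ne_space {x : Char} (h : PySem.Chars.isupper x = true) : (x == ' ') = false := by
  simp [PySem.Chars.isupper, Char.le_def, UInt32.le_iff_toNat_le] at *
  rintro rfl
  simp_all

lemma pyGet?_mid (pre : List Char) (x y : Char) (rs : List Char) :
    PySem.List.pyGet? (pre ++ x :: y :: rs) ((pre.length : Int) + 1) = some y := by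
  have : (pre.length : Int) + 1 = ((pre.length + 1 : Nat) : Int) := by push_cast; ring
  rw [this, PySem.List.pyGet?_natCast]
  rw [List.getElem?_append_right (by omega)]
  simp

lemma capLoopA_eq_capB : ∀ (rest pre out : List Char) (c : Bool),
    capLoopA (pre ++ rest) rest false c out (pre.length : Int) = out ++ capB c rest := by
  intro rest
  induction rest with
  | nil => intro pre out c; cases c <;> simp [capLoopA, capB, capRunsB, PySem.Chars.lower]
  | cons x rs ih =>
    intro pre out c
    have hlen : (pre.length : Int) + 1 = (((pre ++ [x]).length : Nat) : Int) := by
      push_cast [List.length_append, List.length_cons, List.length_nil]; ring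
    have hassoc : pre ++ x :: rs = (pre ++ [x]) ++ rs := by simp
    by_cases hu : PySem.Chars.isupper x = true
    · -- x is an uppercase letter
      have hl : PySem.Chars.islower x = false := upper_not_lower hu
      have ha : PySem.Chars.isalpha x = true := by simp [PySem.Chars.isalpha, hu]
      cases c with
      | true =>
        -- inside a run: "we got nothing" branch, lower the char, stay incaps
        have : capLoopA (pre ++ x :: rs) (x :: rs) false true out (pre.length : Int)
            = capLoopA (pre ++ x :: rs) rs (if (pre.length : Int) + 1 ≥ ((pre ++ x :: rs).length : Int) then true else false) true (out ++ [PySem.Chars.lowerChar x]) ((pre.length : Int) + 1) := by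
          simp [capLoopA, hu, ha, hl]
        rw [this]
        have heol : ¬ ((pre.length : Int) + 1 ≥ ((pre ++ x :: rs).length : Int)) ∨ rs = [] := by
          rcases rs with _ | _ <;> simp <;> omega
        rcases heol with heol | rfl
        · rw [if_neg heol, hassoc, hlen, ih]
          simp [capB, hu, PySem.Chars.lower]
        · -- rs = []: eol true; the loop ends right after this iteration
          rw [if_pos (by simp)]
          simp [capLoopA, capB, capRunsB, PySem.Chars.lower, hu]
      | false =>
        -- run start
        rcases rs with _ | ⟨y, rs'⟩
        · -- last char: eol branch returns
          have : capLoopA (pre ++ [x]) [x] false false out (pre.length : Int)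
              = out ++ [','] ++ [PySem.Chars.lowerChar x] := by
            simp [capLoopA, hu, ha, hl]
          rw [this]
          simp [capB, capRunsB, ha, hl, PySem.Chars.lower]
        · have hnxt : (PySem.List.pyGet? (pre ++ x :: y :: rs') ((pre.length : Int) + 1)).getD ' ' = y := by
            rw [pyGet?_mid]
            rfl
          have heol : ¬ ((pre.length : Int) + 1 ≥ ((pre ++ x :: y :: rs').length : Int)) := by
            push_cast [List.length_append, List.length_cons]; omega
          by_cases hy : PySem.Chars.isupper y = true
          · have : capLoopA (pre ++ x :: y :: rs') (x :: y :: rs') false false out (pre.length : Int)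
                = capLoopA (pre ++ x :: y :: rs') (y :: rs') false true (out ++ [',', ','] ++ [PySem.Chars.lowerChar x]) ((pre.length : Int) + 1) := by
              simp only [capLoopA, hu, ha, hl]
              simp only [Bool.false_eq_true, if_false, Bool.not_false, Bool.not_true, Bool.and_false, Bool.and_true, if_neg heol]
              rw [hnxt]
              simp [PySem.Chars.isalpha, hy, upper_not_lower hy, upper_ne_space hy]
            rw [this, hassoc, hlen, ih]
            simp [capB, capRunsB, ha, hl, hy, PySem.Chars.lower]
          · have hcond : (PySem.Chars.isalpha y && !(y == ' ') && !PySem.Chars.islower y) = false := by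
              have := @alpha_not_lower_eq_upper y
              cases hsp : (y == ' ') <;> cases hal : PySem.Chars.isalpha y <;>
                cases hlo : PySem.Chars.islower y <;> simp_all
            have : capLoopA (pre ++ x :: y :: rs') (x :: y :: rs') false false out (pre.length : Int)
                = capLoopA (pre ++ x :: y :: rs') (y :: rs') false true (out ++ [','] ++ [PySem.Chars.lowerChar x]) ((pre.length : Int) + 1) := by
              simp only [capLoopA, hu, ha, hl]
              simp only [Bool.false_eq_true, if_false, Bool.not_false, Bool.not_true, Bool.and_false, Bool.and_true, if_neg heol]
              rw [hnxt, hcond]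
              simp
            rw [this, hassoc, hlen, ih]
            simp [capB, capRunsB, ha, hl, hy, PySem.Chars.lower]
    · -- x is not uppercase: passes through (lowered only if it were upper, i.e. unchanged flag logic)
      by_cases hlo : PySem.Chars.islower x = true
      · have ha : PySem.Chars.isalpha x = true := by simp [PySem.Chars.isalpha, hlo]
        have : capLoopA (pre ++ x :: rs) (x :: rs) false c out (pre.length : Int)
            = capLoopA (pre ++ x :: rs) rs (if (pre.length : Int) + 1 ≥ ((pre ++ x :: rs).length : Int) then true else false) false (out ++ [x]) ((pre.length : Int) + 1) := by
          cases c <;> simp [capLoopA, hu, ha, hlo]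
        rw [this]
        by_cases heol : (pre.length : Int) + 1 ≥ ((pre ++ x :: rs).length : Int)
        · have hrs : rs = [] := by
            cases rs with
            | nil => rfl
            | cons a t => exfalso; simp at heol; omega
          subst hrs
          rw [if_pos heol]
          cases c <;> simp [capLoopA, capB, capRunsB, ha, hlo, hu, PySem.Chars.lower]
        · rw [if_neg heol, hassoc, hlen, ih]
          simp [capB, capRunsB, ha, hlo, hu, PySem.Chars.lower]
      · -- not a letter at all
        have ha : PySem.Chars.isalpha x = false := by
          cases h1 : PySem.Chars.isupper x <;> cases h2 : PySem.Chars.islower x <;>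
            simp_all [PySem.Chars.isalpha]
        have : capLoopA (pre ++ x :: rs) (x :: rs) false c out (pre.length : Int)
            = capLoopA (pre ++ x :: rs) rs false false (out ++ [x]) ((pre.length : Int) + 1) := by
          cases c <;> simp [capLoopA, hu, ha]
        rw [this, hassoc, hlen, ih]
        cases c <;> simp [capB, capRunsB, ha, hu, PySem.Chars.lower]

-- ===== VERDICT (by name: the statement is the Claim_ definition above) =====
theorem capitalise_spec : Claim_equal_capitalise := by
  intro input _
  unfold Spec_capitalise capitalise capitalise_alt
  have := capLoopA_eq_capB input.toList [] [] false
  simpa [capB] using congrArg String.mk this
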